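-- pv_equiv track=rewrite | github.com/clairexen/handicraft | bmextdepsag/reference.py | mkctrl
-- ===== SOURCE A (Python) =====
-- TrueChars = "1ABCDEFGHIJKLMNOPQRSTUVWXYZ"
--
-- def mkctrl(mask):
--     ctrl = ""
--     carry, carry_n = "0", "1"
--     for i in range(len(mask)//2):
--         a, b = mask[2*i:2*(i+1)]
--         a, b = a in TrueChars, b in TrueChars
--         if a:
--             ctrl += carry
--         else:
--             ctrl += carry_n
--         if a != b:
--             carry, carry_n = carry_n, carry
--     return ctrl
-- ===== SOURCE B (Python) =====
-- TrueChars = "1ABCDEFGHIJKLMNOPQRSTUVWXYZ"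
--
-- def mkctrl(mask):
--     n = len(mask) // 2
--     a = [mask[2 * i] in TrueChars for i in range(n)]
--     cuts = [i + 1 for i in range(n) if a[i] != (mask[2 * i + 1] in TrueChars)]
--     out = []
--     start = 0
--     for seg, cut in enumerate(cuts + [n]):
--         digit, digit_n = ("0", "1") if seg % 2 == 0 else ("1", "0")
--         out.append(''.join(digit if a[i] else digit_n for i in range(start, cut)))
--         start = cut
--     return ''.join(out)
-- ===== Notes on version B (the rewrite author's own statement) =====
-- stated objective: alternative
-- what changed: Instead of a per-pair carry toggle, B first computes the list of cut positions (indices after which the carry flips), then emits the output as whole constant-carry segments between consecutive cuts, the carry of each segment being just the segment number's parity.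
import Mathlib
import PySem

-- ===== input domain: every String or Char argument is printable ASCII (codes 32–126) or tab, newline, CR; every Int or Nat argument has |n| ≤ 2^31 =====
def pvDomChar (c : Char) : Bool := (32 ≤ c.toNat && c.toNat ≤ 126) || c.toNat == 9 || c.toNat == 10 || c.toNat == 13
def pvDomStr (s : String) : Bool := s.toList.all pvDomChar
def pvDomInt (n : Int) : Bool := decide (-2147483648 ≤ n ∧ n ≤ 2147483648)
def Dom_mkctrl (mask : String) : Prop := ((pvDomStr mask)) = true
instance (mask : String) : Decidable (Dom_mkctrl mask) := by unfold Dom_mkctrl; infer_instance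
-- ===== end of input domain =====

-- B replaces A's running carry/carry_n toggle by computing the list of cut positions once
-- and then emitting the output segment by segment, the carry of a segment being the parity
-- of its segment number (alternative decomposition, same cost).

-- module-level constant TrueChars
def pvTrueChars : List Char := "1ABCDEFGHIJKLMNOPQRSTUVWXYZ".toList

-- ===== PORT A =====
-- 'a, b = mask[2*i:2*(i+1)]' unpacks two chars that are always in range (i < len//2);
-- ported as the two in-range indexings pyGetD ms (2*i) / pyGetD ms (2*i+1) (exact here).
def mkctrl (mask : String) : String :=
  let ms := mask.toList
  let r := (PySem.List.pyRange 0 ((ms.length / 2 : Nat) : Int) 1).foldl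
    (fun (st : String × String × String) i =>
      let a := decide (PySem.List.pyGetD ms (2*i) ' ' ∈ pvTrueChars)
      let b := decide (PySem.List.pyGetD ms (2*i+1) ' ' ∈ pvTrueChars)
      let ctrl := if a then st.1 ++ st.2.1 else st.1 ++ st.2.2
      if a != b then (ctrl, st.2.2, st.2.1) else (ctrl, st.2.1, st.2.2))
    ("", "0", "1")
  r.1

-- ===== PORT B =====
-- indexings mask[2*i] / mask[2*i+1] / a[i] are always in range for i < len//2; ported as getD;
-- the segment strings are ported as List Char (digit/digit_n are single chars), joined by flatten.
def mkctrl_alt (mask : String) : String :=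
  let ms := mask.toList
  let n := ms.length / 2
  let a := (List.range n).map (fun i => decide (ms.getD (2*i) ' ' ∈ pvTrueChars))
  let cuts := ((List.range n).filter
      (fun i => a.getD i false != decide (ms.getD (2*i+1) ' ' ∈ pvTrueChars))).map (· + 1)
  let r := (PySem.List.enumerate (cuts ++ [n]) 0).foldl
    (fun (st : Nat × List (List Char)) p =>
      let dd : Char × Char := if PySem.Int.mod p.1 2 == 0 then ('0', '1') else ('1', '0')
      (p.2, st.2 ++ [(List.range' st.1 (p.2 - st.1)).map
        (fun i => if a.getD i false then dd.1 else dd.2)]))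
    (0, [])
  String.ofList r.2.flatten

-- ===== PRECONDITION & SPEC =====
def Spec_mkctrl (mask : String) (out : String) : Prop := out = mkctrl_alt mask
instance (mask : String) (out : String) : Decidable (Spec_mkctrl mask out) := by unfold Spec_mkctrl; infer_instance

-- ===== CLAIM (what is proved, stated in full; the proofs are below) =====
def Claim_equal_mkctrl : Prop := ∀ (mask : String), Dom_mkctrl mask → Spec_mkctrl mask (mkctrl mask)

-- ===== LEMMAS AND PROOFS =====

def pvA (ms : List Char) (i : Nat) : Bool := decide (ms.getD (2*i) ' ' ∈ pvTrueChars)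
def pvB (ms : List Char) (i : Nat) : Bool := decide (ms.getD (2*i+1) ' ' ∈ pvTrueChars)
def pvFlip (ms : List Char) (i : Nat) : Bool := pvA ms i != pvB ms i

def pvPar (ms : List Char) : Nat → Bool
  | 0 => false
  | n+1 => pvPar ms n != pvFlip ms n

def pvCh (ms : List Char) (i : Nat) : Char := if pvPar ms i == pvA ms i then '1' else '0'

def pvOut (ms : List Char) (n : Nat) : List Char := (List.range n).map (pvCh ms)

-- A's fold, characterised
lemma foldA_eq (ms : List Char) (n : Nat) :
    ((PySem.List.pyRange 0 (n : Int) 1).foldl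
      (fun (st : String × String × String) i =>
        let a := decide (PySem.List.pyGetD ms (2*i) ' ' ∈ pvTrueChars)
        let b := decide (PySem.List.pyGetD ms (2*i+1) ' ' ∈ pvTrueChars)
        let ctrl := if a then st.1 ++ st.2.1 else st.1 ++ st.2.2
        if a != b then (ctrl, st.2.2, st.2.1) else (ctrl, st.2.1, st.2.2))
      ("", "0", "1")) =
    (String.ofList (pvOut ms n),
     (if pvPar ms n then "1" else "0"),
     (if pvPar ms n then "0" else "1")) := by
  induction n with
  | zero => simp [PySem.List.pyRange_one_eq_nil, pvOut, pvPar]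
  | succ n ih =>
      have hc : ((n+1 : Nat) : Int) = (n : Int) + 1 := by push_cast; ring
      rw [hc, PySem.List.pyRange_one_succ_right (by positivity), List.foldl_append, ih]
      have ha : PySem.List.pyGetD ms (2*(n:Int)) ' ' = ms.getD (2*n) ' ' := by
        have : (2*(n:Int)) = ((2*n : Nat) : Int) := by push_cast; ring
        rw [this, PySem.List.pyGetD_natCast]
      have hb : PySem.List.pyGetD ms (2*(n:Int)+1) ' ' = ms.getD (2*n+1) ' ' := by
        have : (2*(n:Int)+1) = ((2*n+1 : Nat) : Int) := by push_cast; ring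
        rw [this, PySem.List.pyGetD_natCast]
      simp only [List.foldl_cons, List.foldl_nil, ha, hb]
      simp only [show decide (ms.getD (2 * n) ' ' ∈ pvTrueChars) = pvA ms n from rfl,
        show decide (ms.getD (2 * n + 1) ' ' ∈ pvTrueChars) = pvB ms n from rfl]
      have hout : pvOut ms (n+1) = pvOut ms n ++
          [if pvPar ms n == pvA ms n then '1' else '0'] := by
        simp [pvOut, pvCh, List.range_succ]
      rw [hout]
      show (if pvA ms n != pvB ms n then _ else _) = _
      simp only [pvPar, pvFlip]
      rcases Bool.eq_false_or_eq_true (pvA ms n) with hA | hA <;>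
        rcases Bool.eq_false_or_eq_true (pvB ms n) with hB | hB <;>
        rcases Bool.eq_false_or_eq_true (pvPar ms n) with hP | hP <;>
        simp [hA, hB, hP]

-- the carry at position i is the parity of the number of flips before i
lemma par_iff (ms : List Char) (i : Nat) :
    pvPar ms i = ((List.range i).countP (pvFlip ms) % 2 == 1) := by
  induction i with
  | zero => simp [pvPar]
  | succ i ih =>
      rw [pvPar, ih, List.range_succ, List.countP_append]
      rcases Bool.eq_false_or_eq_true (pvFlip ms i) with hF | hF <;>
        rcases Nat.mod_two_eq_zero_or_one ((List.range i).countP (pvFlip ms)) with hP | hP <;>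
        simp [hF, hP, Nat.add_mod]

lemma le_getLastD_of_pairwise {c : Nat} {t : List Nat}
    (h : List.Pairwise (· ≤ ·) (c :: t)) : c ≤ t.getLastD c := by
  induction t generalizing c with
  | nil => simp
  | cons a t ih =>
      rw [List.getLastD_cons]
      have h1 : c ≤ a := (List.pairwise_cons.1 h).1 a List.mem_cons_self
      exact le_trans h1 (ih (List.pairwise_cons.1 h).2)

-- the number of mapped cut positions ≤ i equals the number of flips before i
lemma cnt_cuts (ms : List Char) (n i : Nat) (h : i < n) :
    (((List.range n).filter (pvFlip ms)).map (· + 1)).countP (fun c => decide (c ≤ i))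
      = (List.range i).countP (pvFlip ms) := by
  rw [List.countP_map, List.countP_filter]
  have hn : n = i + (n - i) := by omega
  rw [hn, List.range_add, List.countP_append]
  simp only [Function.comp_def]
  have h2 : (List.map (fun x => i + x) (List.range (n - i))).countP
      (fun a => decide (a + 1 ≤ i) && pvFlip ms a) = 0 := by
    rw [List.countP_eq_zero]
    intro a ha
    simp only [List.mem_map, List.mem_range] at ha
    obtain ⟨k, _, rfl⟩ := ha
    have : ¬ (i + k + 1 ≤ i) := by omega
    simp [this]
  rw [h2, Nat.add_zero]
  apply List.countP_congr
  intro a ha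
  rw [List.mem_range] at ha
  simp [ha]

-- B's segment fold, characterised: it appends exactly A's characters for [start, last cut)
lemma segfold (ms : List Char) (n : Nat) (al : List Bool)
    (hal : ∀ i, i < n → al.getD i false = pvA ms i) :
    ∀ (cs : List Nat) (start seg : Nat) (acc : List (List Char)),
    List.Pairwise (· ≤ ·) (start :: cs) →
    (∀ c ∈ cs, c ≤ n) →
    (∀ i, start ≤ i → i < n →
      (List.range i).countP (pvFlip ms) = seg + cs.countP (fun c => decide (c ≤ i))) →
    ((PySem.List.enumerate cs (seg : Int)).foldl
      (fun (st : Nat × List (List Char)) p =>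
        let dd : Char × Char := if PySem.Int.mod p.1 2 == 0 then ('0', '1') else ('1', '0')
        (p.2, st.2 ++ [(List.range' st.1 (p.2 - st.1)).map
          (fun i => if al.getD i false then dd.1 else dd.2)]))
      (start, acc)).2.flatten
      = acc.flatten ++ (List.range' start (cs.getLastD start - start)).map (pvCh ms) := by
  intro cs
  induction cs with
  | nil => intro start seg acc _ _ _; simp [PySem.List.enumerate_nil]
  | cons c t ih =>
      intro start seg acc hpw hle hcnt
      rw [PySem.List.enumerate_cons, List.foldl_cons]
      have hsc : start ≤ c := (List.pairwise_cons.1 hpw).1 c List.mem_cons_self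
      have hct : ∀ x ∈ t, c ≤ x := (List.pairwise_cons.1 (List.pairwise_cons.1 hpw).2).1
      have hcn : c ≤ n := hle c List.mem_cons_self
      have hm2 : PySem.Int.mod ((seg : Nat) : Int) 2 = ((seg % 2 : Nat) : Int) := by
        simp [pysem]
      have hmod : (PySem.Int.mod ((seg : Nat) : Int) 2 == 0) = (seg % 2 == 0) := by
        rw [hm2]
        rcases Nat.mod_two_eq_zero_or_one seg with hm | hm <;> rw [hm] <;> rfl
      -- the first emitted segment consists of A's characters
      have hseg : (List.range' start (c - start)).map
          (fun i => if al.getD i false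
            then (if PySem.Int.mod (seg : Int) 2 == 0 then (('0','1') : Char × Char) else ('1','0')).1
            else (if PySem.Int.mod (seg : Int) 2 == 0 then (('0','1') : Char × Char) else ('1','0')).2)
          = (List.range' start (c - start)).map (pvCh ms) := by
        apply List.map_congr_left
        intro i hi
        rw [List.mem_range'_1] at hi
        have hin : i < n := by omega
        have hcnti : (List.range i).countP (pvFlip ms) = seg := by
          have := hcnt i hi.1 hin
          have hz : (c :: t).countP (fun c' => decide (c' ≤ i)) = 0 := by
            rw [List.countP_eq_zero]
            intro x hx
            rcases List.mem_cons.1 hx with rfl | hx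
            · simp; omega
            · have := hct x hx; simp; omega
          omega
        rw [hal i hin, pvCh, par_iff, hcnti, hmod]
        rcases Nat.mod_two_eq_zero_or_one seg with hm | hm <;>
          rcases Bool.eq_false_or_eq_true (pvA ms i) with hA | hA <;>
          simp [hm, hA]
      simp only []
      rw [show ((seg : Int) + 1) = ((seg + 1 : Nat) : Int) by push_cast; ring]
      rw [ih c (seg + 1) _ (List.pairwise_cons.1 hpw).2
        (fun x hx => hle x (List.mem_cons_of_mem c hx))
        (by
          intro i hci hin
          have := hcnt i (le_trans hsc hci) hin
          have hone : (c :: t).countP (fun c' => decide (c' ≤ i))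
              = 1 + t.countP (fun c' => decide (c' ≤ i)) := by
            rw [List.countP_cons]
            simp [hci]
            omega
          omega)]
      have hcl : c ≤ t.getLastD c :=
        le_getLastD_of_pairwise (List.pairwise_cons.1 hpw).2
      rw [List.getLastD_cons, List.flatten_append, hseg]
      simp only [List.flatten_cons, List.flatten_nil, List.append_nil]
      rw [List.append_assoc, ← List.map_append]
      have hr : List.range' start (c - start) ++ List.range' (start + (c - start)) (t.getLastD c - c)
          = List.range' start ((c - start) + (t.getLastD c - c)) := List.range'_append_1
      rw [show start + (c - start) = c from by omega] at hr
      rw [hr, show c - start + (t.getLastD c - c) = t.getLastD c - start from by omega]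

-- ===== VERDICT (by name: the statement is the Claim_ definition above) =====
theorem mkctrl_spec : Claim_equal_mkctrl := by
  intro mask _
  unfold Spec_mkctrl mkctrl mkctrl_alt
  set ms := mask.toList with hms
  set n := ms.length / 2 with hn
  simp only []
  rw [foldA_eq ms n]
  have hal : ∀ i, i < n →
      ((List.range n).map (fun i => decide (ms.getD (2*i) ' ' ∈ pvTrueChars))).getD i false
        = pvA ms i := by
    intro i hi
    rw [List.getD_eq_getElem?_getD, List.getElem?_map, List.getElem?_range hi]
    rfl
  have hfilter : (List.range n).filter
      (fun i => ((List.range n).map (fun i => decide (ms.getD (2*i) ' ' ∈ pvTrueChars))).getD i false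
        != decide (ms.getD (2*i+1) ' ' ∈ pvTrueChars))
      = (List.range n).filter (pvFlip ms) := by
    apply List.filter_congr
    intro i hi
    rw [List.mem_range] at hi
    rw [hal i hi]
    rfl
  rw [hfilter]
  set cuts := ((List.range n).filter (pvFlip ms)).map (· + 1) with hcuts
  have hcn : ∀ c ∈ cuts, c ≤ n := by
    intro c hc
    rw [hcuts] at hc
    simp only [List.mem_map, List.mem_filter, List.mem_range] at hc
    obtain ⟨j, ⟨hj, _⟩, rfl⟩ := hc
    omega
  have hpw : List.Pairwise (· ≤ ·) (0 :: (cuts ++ [n])) := by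
    rw [List.pairwise_cons]
    refine ⟨fun x _ => Nat.zero_le x, ?_⟩
    rw [List.pairwise_append]
    refine ⟨?_, by simp, fun x hx _ h1 => by rw [List.mem_singleton] at h1; subst h1; exact hcn x hx⟩
    exact ((List.pairwise_lt_range).filter _ |>.map _
      (fun a b h => by omega)).imp (fun h => le_of_lt h)
  have hcnt : ∀ i, 0 ≤ i → i < n →
      (List.range i).countP (pvFlip ms)
        = 0 + (cuts ++ [n]).countP (fun c => decide (c ≤ i)) := by
    intro i _ hi
    rw [List.countP_append, hcuts, cnt_cuts ms n i hi]
    have : ([n] : List Nat).countP (fun c => decide (c ≤ i)) = 0 := by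
      simp [List.countP_cons]
      omega
    omega
  have := segfold ms n _ hal (cuts ++ [n]) 0 0 [] hpw
    (by
      intro c hc
      rcases List.mem_append.1 hc with h | h
      · exact hcn c h
      · rw [List.mem_singleton] at h; omega)
    hcnt
  rw [show ((0 : Nat) : Int) = 0 by norm_num] at this
  rw [this, List.getLastD_concat]
  simp [pvOut, List.range_eq_range']
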